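-- pv_equiv track=rewrite | github.com/senyalin/MERank | MERank/goldstandard.py | combine_content_gold_ver
-- ===== SOURCE A (Python) =====
-- def combine_content_gold_ver(content = None):
--     if content:
--         tempPos = []
--         displayLatex = []
--
--         for index, i in enumerate(content):
--             if "\displaystyle=" in i:
--                 tempPos.append(index)
--             index += 1
--
--         needCombine = False
--         tempString = ""
--
--         for index, i in enumerate(content):
--             needCombine = False
--             if index + 1 in tempPos:
--                 needCombine = True
--             if len(tempString) > 2:
--                 if tempString[0:6] == '<latex>' and tempString[-7:-1] == '<latex>':
--                     tempString == tempString[1:len(tempString)-1]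
--             if i[0:6] == '<latex>' and i[-7:-1] == '<latex>':
--                 tempString += i[7:-7]
--             else:
--                 tempString += i
--             if not needCombine:
--                 displayLatex.append(tempString)
--                 tempString = ""
--         return displayLatex
--     else:
--         return None
-- ===== SOURCE B (Python) =====
-- def combine_content_gold_ver(content = None):
--     if not content:
--         return None
--     xs = list(content)
--     out = []
--     buf = ""
--     i = 0
--     while i + 1 < len(xs):
--         if "\displaystyle=" in xs[i + 1]:
--             buf += xs[i]
--         else:
--             out.append(buf + xs[i])
--             buf = ""
--         i += 1
--     out.append(buf + xs[-1])
--     return out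
-- ===== Notes on version B (the rewrite author's own statement) =====
-- stated objective: simpler
-- what changed: Replaces A's two passes (precomputing a tempPos index list, then an enumerate loop that scans tempPos for index+1, with dead always-false '<latex>' guards and a no-op comparison) with one plain loop that looks ahead at the next segment directly and concatenates runs.
import Mathlib
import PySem

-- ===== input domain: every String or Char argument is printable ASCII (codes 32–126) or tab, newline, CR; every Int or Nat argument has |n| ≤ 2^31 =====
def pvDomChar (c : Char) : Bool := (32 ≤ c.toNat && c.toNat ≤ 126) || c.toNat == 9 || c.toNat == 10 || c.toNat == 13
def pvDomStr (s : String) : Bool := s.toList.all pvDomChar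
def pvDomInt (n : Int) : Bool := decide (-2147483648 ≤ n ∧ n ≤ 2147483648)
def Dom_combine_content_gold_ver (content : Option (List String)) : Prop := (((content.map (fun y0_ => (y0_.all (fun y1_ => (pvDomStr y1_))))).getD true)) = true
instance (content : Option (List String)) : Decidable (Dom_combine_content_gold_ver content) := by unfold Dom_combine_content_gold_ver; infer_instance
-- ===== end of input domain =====

-- B replaces A's two index-based passes by one structural recursion with lookahead (objective: simpler).

-- ===== PORT A =====
-- "\displaystyle=" in Python has no escape: it is a literal backslash.
def pvMarker : String := "\\displaystyle="

-- first loop: tempPos collects the enumerate indices of marker-containing segments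
-- (the Python body's `index += 1` mutates only the loop-local copy: no effect).
def pvTempPos (l : List String) : List Int :=
  (PySem.List.enumerate l 0).foldl
    (fun tp p => if PySem.Str.isIn pvMarker p.2 then tp ++ [p.1] else tp) []

-- second loop body; the Python `if len(tempString) > 2: … tempString == tempString[…]`
-- block is a comparison whose value is discarded (no state change), so it contributes nothing.
def pvStepA (tp : List Int) (st : List String × String) (p : Int × String) : List String × String :=
  let needCombine := tp.contains (p.1 + 1)
  let tempString :=
    if PySem.Str.slice p.2 (some 0) (some 6) = "<latex>" ∧
       PySem.Str.slice p.2 (some (-7)) (some (-1)) = "<latex>"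
    then st.2 ++ PySem.Str.slice p.2 (some 7) (some (-7))
    else st.2 ++ p.2
  if needCombine then (st.1, tempString) else (st.1 ++ [tempString], "")

def combine_content_gold_ver (content : Option (List String)) : Option (List String) :=
  match content with
  | none => none
  | some l =>
    if l = [] then none
    else
      some ((PySem.List.enumerate l 0).foldl (pvStepA (pvTempPos l)) ([], "")).1

-- ===== PORT B =====
-- the while loop `while i + 1 < len(xs)` walked with its (out, buf) state: more than one
-- element left ↔ the x :: y :: rest case; the final `out.append(buf + xs[-1])` is the [x] case
def pvGoB (out : List String) (buf : String) (xs : List String) : List String :=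
  match xs with
  | [] => out                                  -- unreachable: called only with nonempty xs
  | [x] => out ++ [buf ++ x]
  | x :: y :: rest =>
      if PySem.Str.isIn pvMarker y
      then pvGoB out (buf ++ x) (y :: rest)
      else pvGoB (out ++ [buf ++ x]) "" (y :: rest)

def combine_content_gold_ver_alt (content : Option (List String)) : Option (List String) :=
  match content with
  | none => none
  | some l => if l = [] then none else some (pvGoB [] "" l)

-- ===== PRECONDITION & SPEC =====
def Spec_combine_content_gold_ver (content : Option (List String)) (out : Option (List String)) : Prop := out = combine_content_gold_ver_alt content
instance (content : Option (List String)) (out : Option (List String)) : Decidable (Spec_combine_content_gold_ver content out) := by unfold Spec_combine_content_gold_ver; infer_instance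

-- ===== CLAIM (what is proved, stated in full; the proofs are below) =====
def Claim_equal_combine_content_gold_ver : Prop := ∀ (content : Option (List String)), Dom_combine_content_gold_ver content → Spec_combine_content_gold_ver content (combine_content_gold_ver content)

-- ===== LEMMAS AND PROOFS =====

-- the `i[0:6] == '<latex>'` guard can never hold: a 6-character slice is not a 7-character string
theorem pvLatexGuardFalse (s : String) : ¬ (PySem.Str.slice s (some 0) (some 6) = "<latex>") := by
  intro h
  have h2 := congrArg (fun t => t.toList.length) h
  simp [PySem.Str.toList_slice, PySem.List.slice_zero_start] at h2
  have h3 : PySem.List.slice s.toList none (some ((6 : Nat) : Int)) = s.toList.take 6 :=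
    PySem.List.slice_to_natCast ..
  norm_num at h3
  rw [h3] at h2
  have h4 : (s.toList.take 6).length ≤ 6 := by
    simp
  omega

-- positions ≥ k recorded while scanning xs from index k
def pvSpecC (xs : List String) (k : Int) (j : Int) : Bool :=
  match xs with
  | [] => false
  | x :: rest => ((j == k) && PySem.Str.isIn pvMarker x) || pvSpecC rest (k + 1) j

theorem pvFoldPos_contains (xs : List String) (k : Int) (acc : List Int) (j : Int) :
    ((PySem.List.enumerate xs k).foldl
      (fun tp p => if PySem.Str.isIn pvMarker p.2 then tp ++ [p.1] else tp) acc).contains j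
    = (acc.contains j || pvSpecC xs k j) := by
  induction xs generalizing k acc with
  | nil => simp [pvSpecC, PySem.List.enumerate_nil]
  | cons x rest ih =>
    rw [PySem.List.enumerate_cons]
    simp only [List.foldl_cons, pvSpecC]
    by_cases h : PySem.Str.isIn pvMarker x
    · have hch : PySem.Chars.isIn pvMarker.toList x.toList = true := by simpa using h
      rw [if_pos h, ih]
      by_cases hjk : j = k <;>
        simp [hjk, hch, Bool.or_comm, Bool.or_left_comm]
    · have hch : PySem.Chars.isIn pvMarker.toList x.toList = false := by simpa using h
      rw [if_neg h, ih]
      simp [hch]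

theorem pvSpecC_lt (xs : List String) (k j : Int) (h : j < k) : pvSpecC xs k j = false := by
  induction xs generalizing k with
  | nil => rfl
  | cons x rest ih =>
    simp [pvSpecC, ih (k + 1) (by omega)]
    intro hj; omega

theorem pvSpecC_at (xs : List String) (k : Int) (i : Nat) :
    pvSpecC xs k (k + i) = ((xs[i]?).map (PySem.Str.isIn pvMarker)).getD false := by
  induction xs generalizing k i with
  | nil => simp [pvSpecC]
  | cons x rest ih =>
    cases i with
    | zero => simp [pvSpecC, pvSpecC_lt rest (k + 1) k (by omega)]
    | succ m =>
      have : k + ((m : Int) + 1) = (k + 1) + m := by omega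
      simp only [pvSpecC]
      push_cast
      rw [this, ih (k + 1) m]
      have hne : ¬ ((k + 1 + (m : Int)) == k) := by simp; omega
      simp [hne]

theorem pvTempPos_contains (l : List String) (m : Nat) :
    (pvTempPos l).contains ((m : Nat) : Int)
      = ((l[m]?).map (PySem.Str.isIn pvMarker)).getD false := by
  unfold pvTempPos
  rw [pvFoldPos_contains]
  have := pvSpecC_at l 0 m
  simpa using this

-- main invariant: A's second fold over the suffix xs (at global start index k)
-- flushes exactly pvGoB's groups
theorem pvMain (l : List String) (xs : List String) (k : Nat) (acc : List String) (buf : String)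
    (hne : xs ≠ [])
    (hsuff : ∀ i : Nat, l[k + i]? = xs[i]?) :
    (PySem.List.enumerate xs (k : Int)).foldl (pvStepA (pvTempPos l)) (acc, buf)
      = (pvGoB acc buf xs, "") := by
  induction xs generalizing k acc buf with
  | nil => exact absurd rfl hne
  | cons x rest ih =>
    rw [PySem.List.enumerate_cons]
    have hstep : pvStepA (pvTempPos l) (acc, buf) ((k : Int), x)
        = if ((rest[0]?).map (PySem.Str.isIn pvMarker)).getD false
          then (acc, buf ++ x) else (acc ++ [buf ++ x], "") := by
      have hc : (pvTempPos l).contains ((k : Int) + 1)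
          = ((rest[0]?).map (PySem.Str.isIn pvMarker)).getD false := by
        have h1 : ((k : Int) + 1) = ((k + 1 : Nat) : Int) := by push_cast; ring
        rw [h1, pvTempPos_contains l (k + 1), hsuff 1]
        simp
      have hg : ¬ (PySem.Str.slice x (some 0) (some 6) = "<latex>" ∧
          PySem.Str.slice x (some (-7)) (some (-1)) = "<latex>") :=
        fun hand => pvLatexGuardFalse x hand.1
      simp only [pvStepA]
      simp only [hc]
      simp [hg]
    cases rest with
    | nil =>
      simp only [List.foldl_cons, hstep]
      simp [PySem.List.enumerate_nil, pvGoB]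
    | cons y rest' =>
      have hsuff' : ∀ i : Nat, l[(k + 1) + i]? = (y :: rest')[i]? := by
        intro i
        have : (k + 1) + i = k + (i + 1) := by omega
        rw [this, hsuff (i + 1)]
        simp
      have hk1 : ((k : Int) + 1) = ((k + 1 : Nat) : Int) := by push_cast; ring
      simp only [List.foldl_cons, hstep]
      by_cases hm : PySem.Chars.isIn pvMarker.toList y.toList
      · have hms : PySem.Str.isIn pvMarker y = true := by simpa using hm
        simp only [List.getElem?_cons_zero, Option.map_some, Option.getD_some, hms, if_true]
        rw [hk1, ih (k + 1) acc (buf ++ x) (by simp) hsuff']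
        simp [pvGoB, hm]
      · have hms : PySem.Str.isIn pvMarker y = false := by simpa using hm
        simp only [List.getElem?_cons_zero, Option.map_some, Option.getD_some, hms,
          Bool.false_eq_true, if_false]
        rw [hk1, ih (k + 1) (acc ++ [buf ++ x]) "" (by simp) hsuff']
        simp [pvGoB, hm]

-- ===== VERDICT (by name: the statement is the Claim_ definition above) =====
theorem combine_content_gold_ver_spec : Claim_equal_combine_content_gold_ver := by
  intro content _
  unfold Spec_combine_content_gold_ver combine_content_gold_ver combine_content_gold_ver_alt
  match content with
  | none => rfl
  | some l =>
    by_cases h : l = []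
    · simp [h]
    · simp only [if_neg h]
      have := pvMain l l 0 [] "" h (fun i => by simp)
      simp only [Nat.cast_zero] at this
      rw [this]
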